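-- pv_equiv track=rewrite | github.com/ferranJS/college-stuff | spell-suggester/functions_suggest.py | cota_complex
-- ===== SOURCE A (Python) =====
-- def cota_complex(x, y):
--     d_x = {}
--     #count occurrences of letters in the two words
--     for l in x:
--         d_x[l] = d_x.get(l, 0) +1
--     d_y = {}
--     for l in y:
--         d_y[l] = d_y.get(l, 0) +1
--     # M is set of all letters
--     M = set(d_y.keys()).union(set(d_x.keys()))
--     pos = 0
--     neg = 0
--     # temp counts the difference in occurrences of one letter to add to the total count
--     # of minimum number of letters that have to be changed
--     for k in M:
--         temp = d_y.get(k, 0)-d_x.get(k, 0)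
--         if temp < 0: neg -= temp
--         else: pos += temp
--     return max(neg, pos)
-- ===== SOURCE B (Python) =====
-- def cota_complex(x, y):
--     # multiset overlap: max(len) - common letters, same value as the pos/neg scan
--     xs, ys = list(x), list(y)
--     common = sum(min(xs.count(c), ys.count(c)) for c in set(xs))
--     return max(len(xs), len(ys)) - common
-- ===== Notes on version B (the rewrite author's own statement) =====
-- stated objective: simpler
-- what changed: Instead of building two count dicts and scanning their key union accumulating separate positive and negative difference sums, B computes the multiset overlap common = sum of min(count_x[c], count_y[c]) over the distinct letters of x and returns max(len(x), len(y)) - common, using the identity pos = len(y) - common, neg = len(x) - common.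
import Mathlib
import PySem

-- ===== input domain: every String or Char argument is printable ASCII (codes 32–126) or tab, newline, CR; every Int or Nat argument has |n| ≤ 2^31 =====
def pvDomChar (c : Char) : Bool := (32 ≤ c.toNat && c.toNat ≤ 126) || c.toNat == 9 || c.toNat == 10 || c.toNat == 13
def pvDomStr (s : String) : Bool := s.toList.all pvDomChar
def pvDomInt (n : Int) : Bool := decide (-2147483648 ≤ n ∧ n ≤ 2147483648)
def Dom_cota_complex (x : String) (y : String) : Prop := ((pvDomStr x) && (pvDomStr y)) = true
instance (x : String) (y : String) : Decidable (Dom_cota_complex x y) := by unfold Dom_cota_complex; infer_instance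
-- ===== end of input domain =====

-- B computes the letter-frequency distance via the multiset-overlap identity
-- max(len x, len y) - sum of min counts, instead of A's union scan with pos/neg sums (objective: simpler).

-- ===== PORT A =====
def cota_complex (x : String) (y : String) : Int :=
  let d_x := x.toList.foldl (fun d l => d.insert l (d.getD l 0 + 1)) (PySem.Dict.empty : PySem.Dict Char Int)
  let d_y := y.toList.foldl (fun d l => d.insert l (d.getD l 0 + 1)) (PySem.Dict.empty : PySem.Dict Char Int)
  let M : PySem.Set Char := PySem.Set.union (PySem.Set.ofList d_y.keys) (PySem.Set.ofList d_x.keys)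
  -- loop over M accumulating (neg, pos); the result is order-independent (a sum), so the
  -- Set's list order stands in for Python's set iteration order exactly
  let r := M.foldl (fun (p : Int × Int) k =>
      let temp := d_y.getD k 0 - d_x.getD k 0
      if temp < 0 then (p.1 - temp, p.2) else (p.1, p.2 + temp)) (0, 0)
  max r.1 r.2

-- ===== PORT B =====
def cota_complex_alt (x : String) (y : String) : Int :=
  let xs := x.toList
  let ys := y.toList
  let common : Int := ((PySem.Set.ofList xs).map
      (fun c => min ((xs.count c : Int)) ((ys.count c : Int)))).sum
  max (PySem.List.len xs) (PySem.List.len ys) - common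

-- ===== PRECONDITION & SPEC =====
def Spec_cota_complex (x : String) (y : String) (out : Int) : Prop := out = cota_complex_alt x y
instance (x : String) (y : String) (out : Int) : Decidable (Spec_cota_complex x y out) := by unfold Spec_cota_complex; infer_instance

-- ===== CLAIM (what is proved, stated in full; the proofs are below) =====
def Claim_equal_cota_complex : Prop := ∀ (x : String) (y : String), Dom_cota_complex x y → Spec_cota_complex x y (cota_complex x y)

-- ===== LEMMAS AND PROOFS =====

-- A's (neg, pos) accumulator loop is the pair of sums of the negative/positive parts.
lemma fold_pair (M : List Char) (t : Char → Int) (n0 p0 : Int) :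
    M.foldl (fun (p : Int × Int) k => if t k < 0 then (p.1 - t k, p.2) else (p.1, p.2 + t k)) (n0, p0)
    = (n0 + (M.map (fun k => if t k < 0 then -t k else 0)).sum,
       p0 + (M.map (fun k => if t k < 0 then 0 else t k)).sum) := by
  induction M generalizing n0 p0 with
  | nil => simp
  | cons c cs ih =>
    simp only [List.foldl_cons, List.map_cons, List.sum_cons]
    split_ifs <;> rw [ih] <;> simp only [Prod.mk.injEq] <;> constructor <;> ring

-- Summing a list's counts over any nodup superset of its support gives its length.
lemma sum_count_superset (M l : List Char) (hnd : M.Nodup) (hsub : ∀ k ∈ l, k ∈ M) :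
    (M.map (fun k => l.count k)).sum = l.length := by
  rw [← List.sum_toFinset _ hnd, ← List.sum_toFinset_count_eq_length l]
  refine (Finset.sum_subset ?_ ?_).symm
  · intro k hk
    simp only [List.mem_toFinset] at *
    exact hsub k hk
  · intro k _ hk
    simp only [List.mem_toFinset] at hk
    simpa using List.count_eq_zero_of_not_mem hk

-- The overlap sum over the union support equals the overlap sum over x's support.
lemma sum_min_superset (M a b : List Char) (hndM : M.Nodup) (hsub : ∀ k ∈ a, k ∈ M) :
    (M.map (fun k => min (a.count k) (b.count k))).sum
    = ((PySem.Set.ofList a).map (fun k => min (a.count k) (b.count k))).sum := by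
  rw [← List.sum_toFinset _ hndM, ← List.sum_toFinset _ (PySem.Set.nodup_ofList a)]
  refine (Finset.sum_subset ?_ ?_).symm
  · intro k hk
    simp only [List.mem_toFinset, PySem.Set.mem_ofList] at *
    exact hsub k hk
  · intro k _ hk
    simp only [List.mem_toFinset, PySem.Set.mem_ofList] at hk
    simp [List.count_eq_zero_of_not_mem hk]

-- Int sum of a difference splits.
lemma sum_map_sub_int (M : List Char) (f g : Char → Int) :
    (M.map (fun k => f k - g k)).sum = (M.map f).sum - (M.map g).sum := by
  induction M with
  | nil => simp
  | cons c cs ih => simp [ih]; ring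

-- Cast of a Nat count-sum.
lemma sum_map_cast (M : List Char) (f : Char → Nat) :
    (M.map (fun k => (f k : Int))).sum = ((M.map f).sum : Int) := by
  induction M with
  | nil => simp
  | cons c cs ih => simp [ih]

-- ===== VERDICT (by name: the statement is the Claim_ definition above) =====
theorem cota_complex_spec : Claim_equal_cota_complex := by
  intro x y _
  unfold Spec_cota_complex cota_complex cota_complex_alt
  set a := x.toList with ha
  set b := y.toList with hb
  simp only [PySem.Dict.foldl_insert_getD_add_one_eq_counter, PySem.Dict.keys_counter,
    PySem.Set.ofList_ofList, PySem.List.len_eq]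
  set M : List Char := PySem.Set.union (PySem.Set.ofList b) (PySem.Set.ofList a) with hM
  have hndM : M.Nodup := PySem.Set.nodup_union _ _ (PySem.Set.nodup_ofList _)
  have hmem : ∀ k : Char, k ∈ a ∨ k ∈ b → k ∈ M := by
    intro k hk
    rw [hM, PySem.Set.mem_union]
    simp only [PySem.Set.mem_ofList]
    tauto
  rw [fold_pair M (fun k => (PySem.Dict.counter b).getD k 0 - (PySem.Dict.counter a).getD k 0) 0 0]
  have hcnt : ∀ (l : List Char) (k : Char), (PySem.Dict.counter l).getD k 0 = (l.count k : Int) :=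
    fun l k => PySem.Dict.getD_counter l k
  have e1 : (fun k => if (PySem.Dict.counter b).getD k 0 - (PySem.Dict.counter a).getD k 0 < 0
        then -((PySem.Dict.counter b).getD k 0 - (PySem.Dict.counter a).getD k 0) else 0)
      = (fun k => (a.count k : Int) - (min (a.count k) (b.count k) : Nat)) := by
    funext k; rw [hcnt, hcnt]; split_ifs <;> omega
  have e2 : (fun k => if (PySem.Dict.counter b).getD k 0 - (PySem.Dict.counter a).getD k 0 < 0
        then 0 else (PySem.Dict.counter b).getD k 0 - (PySem.Dict.counter a).getD k 0)
      = (fun k => (b.count k : Int) - (min (a.count k) (b.count k) : Nat)) := by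
    funext k; rw [hcnt, hcnt]; split_ifs <;> omega
  rw [e1, e2, sum_map_sub_int, sum_map_sub_int, sum_map_cast, sum_map_cast, sum_map_cast,
    sum_count_superset M a hndM (fun k hk => hmem k (Or.inl hk)),
    sum_count_superset M b hndM (fun k hk => hmem k (Or.inr hk)),
    sum_min_superset M a b hndM (fun k hk => hmem k (Or.inl hk))]
  have e3 : ((PySem.Set.ofList a).map (fun c => min ((a.count c : Int)) ((b.count c : Int)))).sum
      = (((PySem.Set.ofList a).map (fun k => min (a.count k) (b.count k))).sum : Int) := by
    rw [← sum_map_cast]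
    exact congrArg List.sum (List.map_congr_left (fun k _ => by omega))
  rw [e3]
  omega
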